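-- pv_equiv track=rewrite | github.com/wdvr/footprint | backend/src/services/email_parser.py | is_travel_email
-- ===== SOURCE A (Python) =====
-- def is_travel_email(subject: str, sender: str) -> bool:
--     """
--     Determine if an email is likely travel-related based on subject and sender.
--     """
--     subject_lower = subject.lower()
--     sender_lower = sender.lower()
--
--     # Travel keywords in subject
--     travel_keywords = [
--         "flight",
--         "booking",
--         "reservation",
--         "confirmation",
--         "itinerary",
--         "boarding pass",
--         "e-ticket",
--         "hotel",
--         "train",
--         "car rental",
--         "trip",
--         "travel",
--         "check-in",
--         "checkout",
--     ]
--
--     # Travel-related senders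
--     travel_senders = [
--         "airline",
--         "airways",
--         "booking.com",
--         "airbnb",
--         "vrbo",
--         "expedia",
--         "hotels.com",
--         "tripadvisor",
--         "kayak",
--         "tripit",
--         "eurostar",
--         "hertz",
--         "avis",
--         "enterprise",
--         "sixt",
--     ]
--
--     for keyword in travel_keywords:
--         if keyword in subject_lower:
--             return True
--
--     for sender_keyword in travel_senders:
--         if sender_keyword in sender_lower:
--             return True
--
--     return False
-- ===== SOURCE B (Python) =====
-- TRAVEL_KEYWORDS = [
--     "flight", "booking", "reservation", "confirmation", "itinerary",
--     "boarding pass", "e-ticket", "hotel", "train", "car rental",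
--     "trip", "travel", "check-in", "checkout",
-- ]
--
-- TRAVEL_SENDERS = [
--     "airline", "airways", "booking.com", "airbnb", "vrbo", "expedia",
--     "hotels.com", "tripadvisor", "kayak", "tripit", "eurostar",
--     "hertz", "avis", "enterprise", "sixt",
-- ]
--
--
-- def _contains_any(text, keywords):
--     # Position-driven scan: walk the text once and at each position ask
--     # whether any keyword starts there.
--     for i in range(len(text)):
--         for kw in keywords:
--             if text.startswith(kw, i):
--                 return True
--     return False
--
--
-- def is_travel_email(subject: str, sender: str) -> bool:
--     return (_contains_any(subject.lower(), TRAVEL_KEYWORDS)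
--             or _contains_any(sender.lower(), TRAVEL_SENDERS))
-- ===== Notes on version B (the rewrite author's own statement) =====
-- stated objective: alternative
-- what changed: Replaces the keyword-driven loop of substring tests ('kw in text' per keyword) by a position-driven single walk over the text that checks at each index whether any keyword starts there (text.startswith(kw, i)).
import Mathlib
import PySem

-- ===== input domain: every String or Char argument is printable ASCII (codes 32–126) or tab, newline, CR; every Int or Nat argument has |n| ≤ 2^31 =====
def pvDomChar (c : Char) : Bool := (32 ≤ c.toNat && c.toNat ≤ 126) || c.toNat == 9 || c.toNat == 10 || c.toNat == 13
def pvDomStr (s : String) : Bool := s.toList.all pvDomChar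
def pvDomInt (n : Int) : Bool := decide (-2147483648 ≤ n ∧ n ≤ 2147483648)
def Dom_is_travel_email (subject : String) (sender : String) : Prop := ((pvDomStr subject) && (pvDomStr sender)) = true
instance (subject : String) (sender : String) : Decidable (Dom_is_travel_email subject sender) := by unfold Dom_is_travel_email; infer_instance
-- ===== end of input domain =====

-- ===== PORT A =====
-- B differs only in the scan strategy (per-keyword substring test vs a single positional walk); equivalence proved on all inputs.
def pvTravelKeywords : List String :=
  ["flight", "booking", "reservation", "confirmation", "itinerary",
   "boarding pass", "e-ticket", "hotel", "train", "car rental",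
   "trip", "travel", "check-in", "checkout"]

def pvTravelSenders : List String :=
  ["airline", "airways", "booking.com", "airbnb", "vrbo", "expedia",
   "hotels.com", "tripadvisor", "kayak", "tripit", "eurostar",
   "hertz", "avis", "enterprise", "sixt"]

-- A: lowercase both strings, then a keyword-driven loop with early return
-- (the for-loop returning True on the first hit is List.any).
def is_travel_email (subject : String) (sender : String) : Bool :=
  let subjectLower := PySem.Str.lower subject
  let senderLower := PySem.Str.lower sender
  if pvTravelKeywords.any (fun kw => PySem.Str.isIn kw subjectLower) then true
  else if pvTravelSenders.any (fun kw => PySem.Str.isIn kw senderLower) then true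
  else false

-- ===== PORT B =====
def pvAltKeywords : List (List Char) := pvTravelKeywords.map String.toList
def pvAltSenders : List (List Char) := pvTravelSenders.map String.toList

-- _contains_any: walk the positions of the text; text.startswith(kw, i) with
-- 0 <= i < len(text) is exactly 'kw is a prefix of text dropped at i' (exact on this domain).
def pvContainsAny (text : List Char) (kws : List (List Char)) : Bool :=
  (List.range text.length).any fun i =>
    kws.any fun kw => PySem.Chars.startswith (text.drop i) kw

def is_travel_email_alt (subject : String) (sender : String) : Bool :=
  pvContainsAny (PySem.Chars.lower subject.toList) pvAltKeywords
    || pvContainsAny (PySem.Chars.lower sender.toList) pvAltSenders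

-- ===== PRECONDITION & SPEC =====
def Spec_is_travel_email (subject : String) (sender : String) (out : Bool) : Prop := out = is_travel_email_alt subject sender
instance (subject : String) (sender : String) (out : Bool) : Decidable (Spec_is_travel_email subject sender out) := by unfold Spec_is_travel_email; infer_instance

-- ===== CLAIM (what is proved, stated in full; the proofs are below) =====
def Claim_equal_is_travel_email : Prop := ∀ (subject : String) (sender : String), Dom_is_travel_email subject sender → Spec_is_travel_email subject sender (is_travel_email subject sender)

-- ===== LEMMAS AND PROOFS =====

-- For a nonempty pattern, being an infix is being a prefix at some position i < length.
theorem pv_infix_iff (kw text : List Char) (h : kw ≠ []) :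
    kw <:+: text ↔ ∃ i < text.length, kw <+: text.drop i := by
  constructor
  · rintro ⟨s, t, rfl⟩
    refine ⟨s.length, ?_, ?_⟩
    · have : kw.length ≠ 0 := by simpa using h
      simp only [List.length_append]
      omega
    · rw [show s ++ kw ++ t = s ++ (kw ++ t) by simp, List.drop_left]
      exact ⟨t, rfl⟩
  · rintro ⟨i, _, hp⟩
    exact hp.isInfix.trans (List.drop_suffix i text).isInfix

theorem pv_containsAny_eq (text : List Char) (kws : List (List Char))
    (h : ∀ kw ∈ kws, kw ≠ []) :
    pvContainsAny text kws = kws.any fun kw => PySem.Chars.isIn kw text := by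
  rw [Bool.eq_iff_iff]
  simp only [pvContainsAny, List.any_eq_true, List.mem_range,
    PySem.Chars.startswith_iff, PySem.Chars.isIn_iff_infix]
  constructor
  · rintro ⟨i, hi, kw, hkw, hp⟩
    exact ⟨kw, hkw, (pv_infix_iff kw text (h kw hkw)).2 ⟨i, hi, hp⟩⟩
  · rintro ⟨kw, hkw, hinf⟩
    obtain ⟨i, hi, hp⟩ := (pv_infix_iff kw text (h kw hkw)).1 hinf
    exact ⟨i, hi, kw, hkw, hp⟩

-- ===== VERDICT (by name: the statement is the Claim_ definition above) =====
theorem is_travel_email_spec : Claim_equal_is_travel_email := by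
  intro subject sender _
  unfold Spec_is_travel_email is_travel_email is_travel_email_alt
  rw [pv_containsAny_eq _ _ (by decide), pv_containsAny_eq _ _ (by decide)]
  simp only [pvAltKeywords, pvAltSenders, List.any_map, PySem.Str.isIn,
    PySem.Str.lower, Function.comp_def]
  rw [Bool.eq_iff_iff]
  simp [List.any_eq_true]
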